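-- pv_equiv track=rewrite | github.com/ERTG-BOTS/stpsher | tgbot/services/sheets.py | _format_consecutive_days
-- ===== SOURCE A (Python) =====
-- from typing import Any, Dict, List, Optional, Tuple
--
-- def _format_consecutive_days(days: List[str]) -> str:
--     """Форматирует последовательные дни"""
--     if not days:
--         return ""
--
--     try:
--         sorted_days = sorted([int(d) for d in days])
--     except ValueError:
--         return ", ".join(days)
--
--     ranges = []
--     start = sorted_days[0]
--     end = start
--
--     for day in sorted_days[1:]:
--         if day == end + 1:
--             end = day
--         else:
--             ranges.append(str(start) if start == end else f"{start}-{end}")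
--             start = end = day
--
--     ranges.append(str(start) if start == end else f"{start}-{end}")
--     return ", ".join(ranges)
-- ===== SOURCE B (Python) =====
-- from typing import List
--
--
-- def _format_consecutive_days(days: List[str]) -> str:
--     """Форматирует последовательные дни"""
--     if not days:
--         return ""
--
--     try:
--         nums = sorted(int(d) for d in days)
--     except ValueError:
--         return ", ".join(days)
--
--     # Peel off one maximal consecutive run per outer iteration; smallest on top.
--     pieces = []
--     stack = nums[::-1]
--     while stack:
--         first = last = stack.pop()
--         while stack and stack[-1] == last + 1:
--             last = stack.pop()
--         pieces.append(str(first) if first == last else f"{first}-{last}")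
--     return ", ".join(pieces)
-- ===== Notes on version B (the rewrite author's own statement) =====
-- stated objective: alternative
-- what changed: Replaces A's single foldl-style scan carrying (ranges, start, end) state with run-peeling: a stack of the sorted days from which each outer iteration pops one maximal consecutive run and formats it.
import Mathlib
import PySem

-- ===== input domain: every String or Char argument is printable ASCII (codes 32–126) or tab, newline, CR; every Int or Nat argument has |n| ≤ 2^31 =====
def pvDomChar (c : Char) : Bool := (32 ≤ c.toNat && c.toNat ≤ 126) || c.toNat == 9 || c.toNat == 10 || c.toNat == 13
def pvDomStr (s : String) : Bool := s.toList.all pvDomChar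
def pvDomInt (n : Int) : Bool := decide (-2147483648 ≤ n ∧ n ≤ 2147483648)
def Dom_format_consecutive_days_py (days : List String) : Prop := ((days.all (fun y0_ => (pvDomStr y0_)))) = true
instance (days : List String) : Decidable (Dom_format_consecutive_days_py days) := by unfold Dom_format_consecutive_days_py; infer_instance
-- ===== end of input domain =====

-- ===== PORT A =====
-- B restructures A's single start/end scan into run-peeling: pop one maximal consecutive run per outer step (objective: alternative decomposition, same cost).
-- fmt start end = `str(start) if start == end else f"{start}-{end}"`
def pvFmt (s e : Int) : String :=
  if s = e then PySem.Int.toStr s else PySem.Int.toStr s ++ "-" ++ PySem.Int.toStr e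

def format_consecutive_days_py (days : List String) : String :=
  if days = [] then ""
  else
    match days.mapM PySem.Int.ofStr? with
    | none => PySem.Str.join ", " days          -- except ValueError: return ", ".join(days)
    | some ints =>
      match PySem.List.sorted ints (fun x => x) false with
      | [] => ""                                 -- unreachable (days nonempty)
      | start :: tail =>
        let st := tail.foldl
          (fun (acc : List String × Int × Int) day =>
            if day = acc.2.2 + 1 then (acc.1, acc.2.1, day)
            else (acc.1 ++ [pvFmt acc.2.1 acc.2.2], day, day))
          ([], start, start)
        PySem.Str.join ", " (st.1 ++ [pvFmt st.2.1 st.2.2])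

-- ===== PORT B =====
-- B pops a stack holding the sorted days reversed (smallest on top); popping that stack
-- is consuming the sorted list front-first, so the port recurses over the list directly.
-- pvTakeRun = the inner `while stack and stack[-1] == last + 1` loop
def pvTakeRun (last : Int) : List Int → Int × List Int
  | [] => (last, [])
  | d :: tl => if d = last + 1 then pvTakeRun d tl else (last, d :: tl)

theorem pvTakeRun_len : ∀ (tl : List Int) (last : Int), (pvTakeRun last tl).2.length ≤ tl.length := by
  intro tl
  induction tl with
  | nil => intro last; simp [pvTakeRun]
  | cons d tl ih =>
    intro last
    simp only [pvTakeRun]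
    split
    · exact le_trans (ih d) (Nat.le_succ _)
    · simp

-- pvPieces = the outer `while stack` loop building `pieces`
def pvPieces : List Int → List String
  | [] => []
  | d :: tl =>
    let p := pvTakeRun d tl
    pvFmt d p.1 :: pvPieces p.2
termination_by l => l.length
decreasing_by simpa using Nat.lt_succ_of_le (pvTakeRun_len tl d)

def format_consecutive_days_py_alt (days : List String) : String :=
  if days = [] then ""
  else
    match days.mapM PySem.Int.ofStr? with
    | none => PySem.Str.join ", " days
    | some ints =>
      PySem.Str.join ", " (pvPieces (PySem.List.sorted ints (fun x => x) false))

-- ===== PRECONDITION & SPEC =====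
def Spec_format_consecutive_days_py (days : List String) (out : String) : Prop := out = format_consecutive_days_py_alt days
instance (days : List String) (out : String) : Decidable (Spec_format_consecutive_days_py days out) := by unfold Spec_format_consecutive_days_py; infer_instance

-- ===== CLAIM (what is proved, stated in full; the proofs are below) =====
def Claim_equal_format_consecutive_days_py : Prop := ∀ (days : List String), Dom_format_consecutive_days_py days → Spec_format_consecutive_days_py days (format_consecutive_days_py days)

-- ===== LEMMAS AND PROOFS =====

-- ===== VERDICT (by name: the statement is the Claim_ definition above) =====
-- A's loop and B's run-peeling produce the same piece list, from any state.
theorem loop_eq_pieces : ∀ (tl : List Int) (acc : List String) (start en : Int),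
    (tl.foldl
      (fun (acc : List String × Int × Int) day =>
        if day = acc.2.2 + 1 then (acc.1, acc.2.1, day)
        else (acc.1 ++ [pvFmt acc.2.1 acc.2.2], day, day))
      (acc, start, en)).1
    ++ [pvFmt (tl.foldl
      (fun (acc : List String × Int × Int) day =>
        if day = acc.2.2 + 1 then (acc.1, acc.2.1, day)
        else (acc.1 ++ [pvFmt acc.2.1 acc.2.2], day, day))
      (acc, start, en)).2.1
       (tl.foldl
      (fun (acc : List String × Int × Int) day =>
        if day = acc.2.2 + 1 then (acc.1, acc.2.1, day)
        else (acc.1 ++ [pvFmt acc.2.1 acc.2.2], day, day))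
      (acc, start, en)).2.2]
    = acc ++ pvFmt start (pvTakeRun en tl).1 :: pvPieces (pvTakeRun en tl).2 := by
  intro tl
  induction tl with
  | nil => intro acc start en; simp [pvTakeRun, pvPieces]
  | cons d tl ih =>
    intro acc start en
    by_cases h : d = en + 1
    · simp only [List.foldl_cons, pvTakeRun, if_pos h]
      exact ih acc start d
    · simp only [List.foldl_cons, pvTakeRun, if_neg h]
      rw [ih (acc ++ [pvFmt start en]) d d]
      simp [pvPieces]

theorem format_consecutive_days_py_spec : Claim_equal_format_consecutive_days_py := by
  intro days _
  unfold Spec_format_consecutive_days_py format_consecutive_days_py format_consecutive_days_py_alt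
  by_cases h : days = []
  · simp [h]
  · simp only [if_neg h]
    cases days.mapM PySem.Int.ofStr? with
    | none => rfl
    | some ints =>
      cases hs : PySem.List.sorted ints (fun x => x) false with
      | nil => simp [hs, pvPieces, PySem.Str.join]
      | cons start tail =>
        simp only [hs]
        rw [loop_eq_pieces tail [] start start]
        simp [pvPieces]
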